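-- pv_equiv track=rewrite | github.com/pypi-data/pypi-mirror-364 | packages/compute-wer/compute_wer-0.1.6-py3-none-any.whl/compute_wer/utils.py | strip_tags
-- ===== SOURCE A (Python) =====
-- def strip_tags(token):
--     """
--     Strip the tags from the token.
--     Args:
--         token: token to strip the tags
--     Returns:
--         token without tags
--     """
--     if not token:
--         return ""
--     chars = []
--     i = 0
--     while i < len(token):
--         if token[i] == "<":
--             end = token.find(">", i) + 1
--             if end == 0:
--                 chars.append(token[i])
--                 i += 1
--             else:
--                 i = end
--         else:
--             chars.append(token[i])
--             i += 1
--     return "".join(chars)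
-- ===== SOURCE B (Python) =====
-- def strip_tags(token):
--     """
--     Strip the tags from the token.
--     Args:
--         token: token to strip the tags
--     Returns:
--         token without tags
--     """
--     out = []
--     i = 0
--     while True:
--         lt = token.find("<", i)
--         if lt == -1:
--             out.append(token[i:])
--             break
--         gt = token.find(">", lt)
--         if gt == -1:
--             # no '>' remains ahead: every remaining '<' is literal
--             out.append(token[i:])
--             break
--         out.append(token[i:lt])
--         i = gt + 1
--     return "".join(out)
-- ===== Notes on version B (the rewrite author's own statement) =====
-- stated objective: faster
-- what changed: Replaces A's char-by-char scan that re-runs find('>') at every '<' by find-based chunk copying that emits whole segments between tags and copies the entire remainder verbatim as soon as no '>' lies ahead.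
import Mathlib
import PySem

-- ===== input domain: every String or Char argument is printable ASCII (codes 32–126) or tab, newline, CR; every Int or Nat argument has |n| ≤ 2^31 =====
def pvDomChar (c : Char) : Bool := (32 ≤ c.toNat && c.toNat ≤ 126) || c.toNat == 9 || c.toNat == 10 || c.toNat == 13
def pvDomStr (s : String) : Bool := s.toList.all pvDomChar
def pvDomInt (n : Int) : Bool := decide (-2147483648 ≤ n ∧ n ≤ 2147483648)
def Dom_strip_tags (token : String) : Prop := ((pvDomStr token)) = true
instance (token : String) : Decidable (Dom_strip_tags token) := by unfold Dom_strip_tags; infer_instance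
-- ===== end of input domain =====

-- B replaces A's per-'<' rescans (token.find from i at every '<') by find-based chunk
-- copying that emits the whole remainder once no '>' lies ahead; objective: faster (asymptotic).

-- ===== PORT A =====
-- 'token.find(">", i) + 1 == 0' ↔ no '>' in the suffix after position i; since token[i] = '<',
-- that is '>' ∉ rest.  'i = end' jumps just past that first '>': dropThroughGtA rest.
def dropThroughGtA : List Char → List Char
  | [] => []
  | c :: rest => if c = '>' then rest else dropThroughGtA rest

theorem dropThroughGtA_length_le (s : List Char) : (dropThroughGtA s).length ≤ s.length := by
  induction s with
  | nil => simp [dropThroughGtA]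
  | cons c rest ih =>
    simp only [dropThroughGtA]
    split <;> simp_all <;> omega

-- the while loop of A, as structural recursion on the suffix token[i:]
def loopA : List Char → List Char
  | [] => []
  | c :: rest =>
    if c = '<' then
      if '>' ∈ rest then loopA (dropThroughGtA rest)
      else c :: loopA rest
    else c :: loopA rest
termination_by s => s.length
decreasing_by
  · exact Nat.lt_succ_of_le (dropThroughGtA_length_le rest)
  · simp
  · simp

def strip_tags (token : String) : String :=
  if token = "" then "" else String.ofList (loopA token.toList)

-- ===== PORT B =====
-- Source B: lt = find('<', i) → takeWhile/dropWhile split; gt = find('>', lt) then i = gt + 1 →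
-- drop through the first '>' after the '<'; both "append token[i:]; break" exits return s.
def loopB (s : List Char) : List Char :=
  match h : s.dropWhile (· ≠ '<') with
  | [] => s
  | _ :: r =>
    if '>' ∈ r then s.takeWhile (· ≠ '<') ++ loopB (dropThroughGtA r)
    else s
termination_by s.length
decreasing_by
  have h1 : (s.dropWhile (· ≠ '<')).length ≤ s.length := s.length_dropWhile_le _
  have h2 := dropThroughGtA_length_le r
  rw [h] at h1
  simp at h1
  omega

def strip_tags_alt (token : String) : String := String.ofList (loopB token.toList)

-- ===== PRECONDITION & SPEC =====
def Spec_strip_tags (token : String) (out : String) : Prop := out = strip_tags_alt token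
instance (token : String) (out : String) : Decidable (Spec_strip_tags token out) := by unfold Spec_strip_tags; infer_instance

-- ===== CLAIM (what is proved, stated in full; the proofs are below) =====
def Claim_equal_strip_tags : Prop := ∀ (token : String), Dom_strip_tags token → Spec_strip_tags token (strip_tags token)

-- ===== LEMMAS AND PROOFS =====
theorem loopA_append_pre (pre t : List Char) (h : ∀ c ∈ pre, ¬ c = '<') :
    loopA (pre ++ t) = pre ++ loopA t := by
  induction pre with
  | nil => simp
  | cons c rest ih =>
    have hc : ¬ c = '<' := h c (by simp)
    simp only [List.cons_append, loopA, if_neg hc]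
    rw [ih (fun d hd => h d (by simp [hd]))]

theorem loopA_no_gt (s : List Char) (h : '>' ∉ s) : loopA s = s := by
  induction s with
  | nil => simp [loopA]
  | cons c rest ih =>
    have hr : '>' ∉ rest := fun hr => h (by simp [hr])
    simp only [loopA]
    split <;> simp [ih hr]

theorem dropWhile_head_lt {s : List Char} {c : Char} {r : List Char}
    (h : s.dropWhile (· ≠ '<') = c :: r) : c = '<' := by
  induction s with
  | nil => simp at h
  | cons a t ih =>
    rw [List.dropWhile_cons] at h
    split at h
    · exact ih h
    · simp_all
      exact h.1.symm

theorem loopB_nil {s : List Char} (h : s.dropWhile (· ≠ '<') = []) : loopB s = s := by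
  rw [loopB]
  split
  · rfl
  · next heq => rw [h] at heq; cases heq

theorem loopB_cons {s : List Char} {c : Char} {r : List Char} (h : s.dropWhile (· ≠ '<') = c :: r) :
    loopB s = if '>' ∈ r then s.takeWhile (· ≠ '<') ++ loopB (dropThroughGtA r) else s := by
  rw [loopB]
  split
  · next heq => rw [h] at heq; cases heq
  · next heq => rw [h] at heq; cases heq; rfl

theorem loopA_eq_loopB (s : List Char) : loopA s = loopB s := by
  induction s using loopB.induct with
  | case1 s h =>
    -- no '<' in s
    have hall : ∀ c ∈ s, ¬ c = '<' := by
      have hs := List.takeWhile_append_dropWhile (p := (· ≠ '<')) (l := s)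
      rw [h, List.append_nil] at hs
      intro c hc
      simpa using List.mem_takeWhile_imp (l := s) (p := (· ≠ '<')) (by rw [hs]; exact hc)
    have := loopA_append_pre s [] hall
    simp only [List.append_nil] at this
    rw [loopB_nil h]
    simpa [loopA] using this
  | case2 s c r h hgt ih =>
    have hsplit := List.takeWhile_append_dropWhile (p := (· ≠ '<')) (l := s)
    have hc : c = '<' := dropWhile_head_lt h
    have hpre : ∀ d ∈ s.takeWhile (· ≠ '<'), ¬ d = '<' := by
      intro d hd
      simpa using List.mem_takeWhile_imp hd
    rw [loopB_cons h, if_pos hgt, ← ih]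
    conv_lhs => rw [← hsplit, h, hc]
    rw [loopA_append_pre _ _ hpre]
    simp [loopA, hgt]
  | case3 s c r h hgt =>
    have hsplit := List.takeWhile_append_dropWhile (p := (· ≠ '<')) (l := s)
    have hc : c = '<' := dropWhile_head_lt h
    have hpre : ∀ d ∈ s.takeWhile (· ≠ '<'), ¬ d = '<' := by
      intro d hd
      simpa using List.mem_takeWhile_imp hd
    rw [loopB_cons h, if_neg hgt]
    conv_lhs => rw [← hsplit, h, hc]
    rw [loopA_append_pre _ _ hpre]
    have hone : loopA ('<' :: r) = '<' :: r := by
      simp [loopA, hgt, loopA_no_gt r hgt]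
    rw [hone]
    conv_lhs => rw [show ('<' : Char) :: r = s.dropWhile (· ≠ '<') from by rw [h, hc]]
    exact hsplit

-- ===== VERDICT (by name: the statement is the Claim_ definition above) =====
theorem strip_tags_spec : Claim_equal_strip_tags := by
  intro token _
  unfold Spec_strip_tags strip_tags strip_tags_alt
  split
  · subst_vars; simp [loopB]
  · rw [loopA_eq_loopB]
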